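-- pv_equiv track=rewrite | github.com/OttoSalmela/Advent-of-code-2025 | Day3/Day3.py | findJoltage
-- ===== SOURCE A (Python) =====
-- def maxCharInLine(line):
--     maxValue = 0
--     maxIndex = 0
--     for ii in range(len(line)):
--             if int(line[ii]) > maxValue:
--                 maxValue = int(line[ii])
--                 maxIndex = ii
--     return maxValue, maxIndex
--
-- def findJoltage(line,n,ans=''):
--     if len(ans) == 11:
--         maxValue, maxIndex = maxCharInLine(line)
--         ans += str(maxValue)
--         return int(ans)
--     else:
--         line = line.rstrip('\n')
--         maxValue, maxIndex = maxCharInLine(line[:len(line)-n])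
--         ans += str(maxValue)
--         ans = findJoltage(line[maxIndex+1:],n-1,ans)
--         return(ans)
-- ===== SOURCE B (Python) =====
-- def findJoltage(line, n, ans=''):
--     while len(ans) < 11:
--         line = line.rstrip('\n')
--         best, idx = 0, 0
--         for i, c in enumerate(line[:len(line)-n]):
--             if int(c) > best:
--                 best, idx = int(c), i
--         ans += str(best)
--         line = line[idx+1:]
--         n -= 1
--     last = 0
--     for c in line:
--         last = max(last, int(c))
--     return int(ans + str(last))
-- ===== Notes on version B (the rewrite author's own statement) =====
-- stated objective: simpler
-- what changed: The recursion threading ans through a separate maxCharInLine helper is replaced by one self-contained iterative while-loop: the window scan is inlined with enumerate, the 12th digit is computed by a plain running max over values (no index tracking), and int() is applied once at the end; Pre_ excludes the inputs on which A raises (a non-digit reached by int(), unparsable ans, or len(ans) >= 12 where A hits RecursionError while B returns) and, conservatively, a few mixed-content inputs whose greedy path dodges the non-digit characters, on which A and B agree.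
-- outside the precondition, e.g. on findJoltage('1z', 3, ''): A returns 100000000000, B returns 100000000000
import Mathlib
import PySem

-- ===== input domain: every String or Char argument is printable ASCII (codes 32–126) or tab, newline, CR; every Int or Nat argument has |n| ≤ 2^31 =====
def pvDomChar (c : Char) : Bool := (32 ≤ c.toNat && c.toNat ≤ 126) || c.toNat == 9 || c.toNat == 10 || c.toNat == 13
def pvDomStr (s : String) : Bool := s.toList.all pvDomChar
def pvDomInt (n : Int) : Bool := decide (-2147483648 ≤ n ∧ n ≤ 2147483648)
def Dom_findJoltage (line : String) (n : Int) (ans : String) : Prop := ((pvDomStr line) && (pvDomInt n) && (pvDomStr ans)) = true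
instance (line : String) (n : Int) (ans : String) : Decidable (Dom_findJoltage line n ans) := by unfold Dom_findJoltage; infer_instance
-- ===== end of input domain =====

-- B replaces A's recursion + separate scanning helper by one self-contained iterative loop
-- (scan inlined with enumerate, final digit a plain running max, one final int()); objective: simpler.


-- hand port of s.rstrip('\n') (PySem.Chars.rstrip strips whitespace, not a chosen char set);
-- exact: removes exactly the maximal run of trailing '\n' characters
def pvRstripNL (cs : List Char) : List Char := (cs.reverse.dropWhile (fun c => c == '\n')).reverse

-- int(c) for a single character c; exact wherever Python returns (none = ValueError)
def pvIntOfChar (c : Char) : Int := (PySem.Int.ofChars? [c]).getD 0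

-- ===== PORT A =====
def maxCharInLine (cs : List Char) : Int × Int :=
  (PySem.List.pyRange 0 (cs.length : Int) 1).foldl
    (fun st ii =>
      let v := pvIntOfChar (PySem.List.pyGetD cs ii ' ')
      if v > st.1 then (v, ii) else st)
    (0, 0)

def findJoltageAux : Nat → List Char → Int → List Char → Int
  | 0, _, _, _ => 0      -- fuel guard only; with fuel 12 it is never reached on Pre_ inputs
  | fuel+1, line, n, ans =>
    if ans.length = 11 then
      (PySem.Int.ofChars? (ans ++ PySem.Int.toChars (maxCharInLine line).1)).getD 0
    else
      let line1 := pvRstripNL line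
      let r := maxCharInLine (PySem.List.slice line1 none (some ((line1.length : Int) - n)))
      findJoltageAux fuel (PySem.List.slice line1 (some (r.2 + 1)) none) (n - 1)
        (ans ++ PySem.Int.toChars r.1)

def findJoltage (line : String) (n : Int) (ans : String) : Int :=
  findJoltageAux 12 line.toList n ans.toList

-- ===== PORT B =====
-- the while-loop: each pass rstrips, scans the window via enumerate tracking (best, idx),
-- appends str(best) and cuts the line after idx; returns the final (line, ans) state
def findJoltageAltLoop : Nat → List Char → Int → List Char → List Char × List Char
  | 0, line, _, ans => (line, ans)   -- fuel guard only; never reached on Pre_ inputs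
  | fuel+1, line, n, ans =>
    if ans.length < 11 then
      let line1 := pvRstripNL line
      let st := (PySem.List.enumerate
          (PySem.List.slice line1 none (some ((line1.length : Int) - n))) 0).foldl
        (fun st (p : Int × Char) => if pvIntOfChar p.2 > st.1 then (pvIntOfChar p.2, p.1) else st)
        ((0 : Int), (0 : Int))
      findJoltageAltLoop fuel (PySem.List.slice line1 (some (st.2 + 1)) none) (n - 1)
        (ans ++ PySem.Int.toChars st.1)
    else (line, ans)

def findJoltage_alt (line : String) (n : Int) (ans : String) : Int :=
  let p := findJoltageAltLoop 12 line.toList n ans.toList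
  -- last = 0; for c in line: last = max(last, int(c))
  let last := p.1.foldl (fun b c => max b (pvIntOfChar c)) 0
  (PySem.Int.ofChars? (p.2 ++ PySem.Int.toChars last)).getD 0

-- ===== PRECONDITION & SPEC =====
-- Pre_ excludes the inputs on which A raises — a non-digit character reached by int()
-- (ValueError), an unparsable initial ans, or len(ans) ≥ 12 (A recurses past its base case:
-- RecursionError) — and, conservatively, a few mixed inputs whose greedy path happens to dodge
-- its non-digit characters; A and B agree there too (see cites). Admitted: parseable ans of
-- length ≤ 11 with either an all-digit (rstripped) line, or n = len(line) / n ≥ 2·len(line)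
-- (every window is then empty) with an all-digit untouched tail.
def Pre_findJoltage (line : String) (n : Int) (ans : String) : Prop :=
  (PySem.Int.ofChars? (ans.toList ++ ['0'])).isSome = true ∧ ans.toList.length ≤ 11 ∧
  (if ans.toList.length = 11 then line.toList.all Char.isDigit = true
   else ((pvRstripNL line.toList).all Char.isDigit = true ∨
         ((n = ((pvRstripNL line.toList).length : Int) ∨ 2 * ((pvRstripNL line.toList).length : Int) ≤ n) ∧
          ((pvRstripNL line.toList).drop (11 - ans.toList.length)).all Char.isDigit = true)))
instance (line : String) (n : Int) (ans : String) : Decidable (Pre_findJoltage line n ans) := by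
  unfold Pre_findJoltage; infer_instance

def pvWitness_findJoltage : String × Int × String := ("998877665544332211\n", 11, "")

def Spec_findJoltage (line : String) (n : Int) (ans : String) (out : Int) : Prop := out = findJoltage_alt line n ans
instance (line : String) (n : Int) (ans : String) (out : Int) : Decidable (Spec_findJoltage line n ans out) := by unfold Spec_findJoltage; infer_instance

-- ===== CLAIM (what is proved, stated in full; the proofs are below) =====
def Claim_equal_findJoltage : Prop := ∀ (line : String) (n : Int) (ans : String), Dom_findJoltage line n ans → Pre_findJoltage line n ans → Spec_findJoltage line n ans (findJoltage line n ans)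

-- ===== LEMMAS AND PROOFS =====

-- int() of any single domain character is a value in [0, 9] (0 for every char Python rejects)
theorem pvIntOfChar_bound (c : Char) (h : pvDomChar c = true) :
    0 ≤ pvIntOfChar c ∧ pvIntOfChar c ≤ 9 := by
  have hlt : c.toNat < 127 := by
    simp [pvDomChar] at h
    omega
  have key : ∀ k : Fin 127,
      0 ≤ pvIntOfChar (Char.ofNat k.val) ∧ pvIntOfChar (Char.ofNat k.val) ≤ 9 := by decide
  have := key ⟨c.toNat, hlt⟩
  rwa [Char.ofNat_toNat] at this

theorem toChars_len_one (x : Int) (h0 : 0 ≤ x) (h9 : x ≤ 9) :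
    (PySem.Int.toChars x).length = 1 := by
  interval_cases x <;> decide

-- A's helper is the enumerate fold B's loop body performs
theorem maxCharInLine_eq_enum (cs : List Char) :
    maxCharInLine cs =
      (PySem.List.enumerate cs 0).foldl
        (fun st (p : Int × Char) => if pvIntOfChar p.2 > st.1 then (pvIntOfChar p.2, p.1) else st) (0, 0) := by
  rw [PySem.List.enumerate_eq_map_pyRange cs ' ', List.foldl_map]
  rfl

-- the first component of the (best, idx) scan is the plain running max over values
theorem fold_fst (l : List Char) (s v i : Int) :
    ((PySem.List.enumerate l s).foldl
        (fun st (p : Int × Char) => if pvIntOfChar p.2 > st.1 then (pvIntOfChar p.2, p.1) else st)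
        (v, i)).1 =
      l.foldl (fun b c => max b (pvIntOfChar c)) v := by
  induction l generalizing s v i with
  | nil => simp [PySem.List.enumerate_nil]
  | cons a t ih =>
    rw [PySem.List.enumerate_cons]
    simp only [List.foldl_cons]
    by_cases h : pvIntOfChar a > v
    · rw [if_pos h, ih, max_eq_right (le_of_lt h)]
    · rw [if_neg h, ih, max_eq_left (by omega)]

theorem maxCharInLine_fst (cs : List Char) :
    (maxCharInLine cs).1 = cs.foldl (fun b c => max b (pvIntOfChar c)) 0 := by
  rw [maxCharInLine_eq_enum]
  exact fold_fst cs 0 0 0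

theorem maxfold_bound (l : List Char) (hall : ∀ c ∈ l, pvDomChar c = true) (v : Int)
    (hv : 0 ≤ v ∧ v ≤ 9) :
    0 ≤ l.foldl (fun b c => max b (pvIntOfChar c)) v ∧
      l.foldl (fun b c => max b (pvIntOfChar c)) v ≤ 9 := by
  induction l generalizing v with
  | nil => exact hv
  | cons a t ih =>
    simp only [List.foldl_cons]
    refine ih (fun c hc => hall c (by simp [hc])) _ ?_
    have := pvIntOfChar_bound a (hall a (by simp))
    constructor <;> [exact le_max_of_le_left hv.1; exact max_le hv.2 this.2]

theorem mem_rstrip (l : List Char) (c : Char) (hc : c ∈ pvRstripNL l) : c ∈ l := by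
  unfold pvRstripNL at hc
  rw [List.mem_reverse] at hc
  exact List.mem_reverse.mp ((List.dropWhile_sublist _).mem hc)

theorem main_equiv (fuel : Nat) (line : List Char) (n : Int) (ans : List Char)
    (hall : ∀ c ∈ line, pvDomChar c = true)
    (hlen : ans.length ≤ 11) (hfuel : 11 - ans.length < fuel) :
    findJoltageAux fuel line n ans =
      (PySem.Int.ofChars? ((findJoltageAltLoop fuel line n ans).2 ++
        PySem.Int.toChars
          ((findJoltageAltLoop fuel line n ans).1.foldl (fun b c => max b (pvIntOfChar c)) 0))).getD 0 := by
  induction fuel generalizing line n ans with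
  | zero => omega
  | succ f ih =>
    by_cases h11 : ans.length = 11
    · simp only [findJoltageAux, findJoltageAltLoop, if_pos h11,
        if_neg (show ¬ ans.length < 11 by omega)]
      rw [maxCharInLine_fst]
    · simp only [findJoltageAux, findJoltageAltLoop, if_neg h11,
        if_pos (show ans.length < 11 by omega)]
      rw [maxCharInLine_eq_enum]
      set line1 := pvRstripNL line with hline1
      set w := PySem.List.slice line1 none (some ((line1.length : Int) - n)) with hw
      set st := (PySem.List.enumerate w 0).foldl
        (fun st (p : Int × Char) => if pvIntOfChar p.2 > st.1 then (pvIntOfChar p.2, p.1) else st)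
        ((0 : Int), (0 : Int)) with hst
      have hwall : ∀ c ∈ w, pvDomChar c = true := fun c hc =>
        hall c (mem_rstrip line c (PySem.List.mem_of_mem_slice line1 none _ hc))
      have hb : 0 ≤ st.1 ∧ st.1 ≤ 9 := by
        rw [hst, fold_fst]
        exact maxfold_bound w hwall 0 ⟨le_refl 0, by omega⟩
      have hlen1 : (PySem.Int.toChars st.1).length = 1 := toChars_len_one st.1 hb.1 hb.2
      exact ih (PySem.List.slice line1 (some (st.2 + 1)) none) (n - 1)
        (ans ++ PySem.Int.toChars st.1)
        (fun c hc => hall c (mem_rstrip line c (PySem.List.mem_of_mem_slice line1 _ none hc)))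
        (by simp [hlen1]; omega) (by simp [hlen1]; omega)

-- ===== VERDICT (by name: the statement is the Claim_ definition above) =====
theorem findJoltage_spec : Claim_equal_findJoltage := by
  intro line n ans hdom hpre
  unfold Spec_findJoltage findJoltage findJoltage_alt
  have hall : ∀ c ∈ line.toList, pvDomChar c = true := by
    unfold Dom_findJoltage pvDomStr at hdom
    simp only [Bool.and_eq_true, List.all_eq_true] at hdom
    exact fun c hc => hdom.1.1 c hc
  obtain ⟨_, hlen, _⟩ := hpre
  exact main_equiv 12 line.toList n ans.toList hall hlen (by omega)
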